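-- pv_equiv track=rewrite | github.com/letminjae/PCCP | LV2/2024_06/240619/1.py | solution
-- ===== SOURCE A (Python) =====
-- def solution(s):
--     stack = []
--     for i in range(len(s)):
--         if len(stack) == 0:
--             stack.append(s[i])
--         elif stack[-1] == s[i]:
--             stack.pop()
--         else:
--             stack.append(s[i])
--     return 1 if len(stack) == 0 else 0
-- ===== SOURCE B (Python) =====
-- def _cancel_once(chars):
--     """Return a copy with the FIRST adjacent equal pair removed, or None if no pair."""
--     for i in range(len(chars) - 1):
--         if chars[i] == chars[i + 1]:
--             return chars[:i] + chars[i + 2:]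
--     return None
--
--
-- def solution(s):
--     chars = list(s)
--     while True:
--         nxt = _cancel_once(chars)
--         if nxt is None:
--             break
--         chars = nxt
--     return 1 if not chars else 0
-- ===== Notes on version B (the rewrite author's own statement) =====
-- stated objective: alternative
-- what changed: Replaces the one-pass stack with repeated deletion of the first adjacent equal pair until a fixpoint, then checks emptiness (relies on confluence of pair cancellation).
import Mathlib
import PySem

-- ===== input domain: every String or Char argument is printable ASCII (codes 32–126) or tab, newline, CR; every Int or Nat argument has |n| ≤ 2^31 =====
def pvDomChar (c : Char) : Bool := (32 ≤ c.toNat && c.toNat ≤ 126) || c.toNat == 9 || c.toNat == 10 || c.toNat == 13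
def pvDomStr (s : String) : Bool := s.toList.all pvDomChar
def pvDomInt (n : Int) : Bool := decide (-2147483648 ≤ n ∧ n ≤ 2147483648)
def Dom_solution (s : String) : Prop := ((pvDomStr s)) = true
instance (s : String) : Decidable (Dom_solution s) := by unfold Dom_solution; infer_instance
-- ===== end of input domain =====

-- B replaces A's one-pass stack by repeated deletion of the first adjacent equal pair
-- until a fixpoint, then checks emptiness (objective: alternative algorithm, not faster).

-- ===== PORT A =====
-- stack held top-first (Python appends/pops at the end; the branches are A's, in order)
def pvStep (st : List Char) (c : Char) : List Char :=
  match st with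
  | [] => [c]                               -- if len(stack) == 0: append
  | a :: t => if a = c then t               -- elif stack[-1] == s[i]: pop
              else c :: a :: t              -- else: append

def solution (s : String) : Int :=
  let stack := s.toList.foldl pvStep []
  if stack = [] then 1 else 0

-- ===== PORT B =====
-- remove the FIRST adjacent equal pair, or none if there is none (= _cancel_once in Source B)
def pvCancelOnce : List Char → Option (List Char)
  | a :: b :: rest => if a = b then some rest else (pvCancelOnce (b :: rest)).map (a :: ·)
  | _ => none

theorem pvCancelOnce_length : ∀ {l l' : List Char}, pvCancelOnce l = some l' → l'.length < l.length := by
  intro l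
  induction l with
  | nil => intro l' h; simp [pvCancelOnce] at h
  | cons a t ih =>
    intro l' h
    match t, h with
    | [], h' => simp [pvCancelOnce] at h'
    | b :: rest, h =>
      by_cases hab : a = b
      · simp [pvCancelOnce, hab] at h
        subst h; simp
      · simp [pvCancelOnce, hab] at h
        obtain ⟨m, hm, rfl⟩ := h
        have := ih hm
        simp at this ⊢; omega

def pvFix (l : List Char) : List Char :=
  match h : pvCancelOnce l with
  | none => l
  | some l' => pvFix l'
termination_by l.length
decreasing_by exact pvCancelOnce_length h

def solution_alt (s : String) : Int :=
  if pvFix s.toList = [] then 1 else 0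

-- ===== PRECONDITION & SPEC =====
def Spec_solution (s : String) (out : Int) : Prop := out = solution_alt s
instance (s : String) (out : Int) : Decidable (Spec_solution s out) := by unfold Spec_solution; infer_instance

-- ===== CLAIM (what is proved, stated in full; the proofs are below) =====
def Claim_equal_solution : Prop := ∀ (s : String), Dom_solution s → Spec_solution s (solution s)

-- ===== LEMMAS AND PROOFS =====

-- the stack never holds two equal adjacent elements
theorem pvStep_chain {st : List Char} (c : Char) (h : st.IsChain (· ≠ ·)) :
    (pvStep st c).IsChain (· ≠ ·) := by
  match st with
  | [] => simpa [pvStep] using List.isChain_singleton c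
  | a :: t =>
    by_cases hac : a = c
    · simpa [pvStep, hac] using h.suffix ⟨[a], rfl⟩
    · rw [pvStep]
      simp only [hac, if_false]
      exact List.isChain_cons_cons.mpr ⟨Ne.symm hac, h⟩

-- reading the same character twice leaves a duplicate-free stack unchanged
theorem pvStep_step {st : List Char} (c : Char) (h : st.IsChain (· ≠ ·)) :
    pvStep (pvStep st c) c = st := by
  match st with
  | [] => simp [pvStep]
  | a :: t =>
    by_cases hac : a = c
    · subst hac
      match t with
      | [] => simp [pvStep]
      | b :: u =>
        have hab : a ≠ b := (List.isChain_cons_cons.mp h).1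
        simp [pvStep, Ne.symm hab]
    · simp [pvStep, hac]

-- cancelling one adjacent pair does not change the resulting stack
theorem pvCancel_foldl : ∀ (l l' st : List Char), st.IsChain (· ≠ ·) →
    pvCancelOnce l = some l' → l.foldl pvStep st = l'.foldl pvStep st := by
  intro l
  induction l with
  | nil => intro l' st _ h; simp [pvCancelOnce] at h
  | cons a t ih =>
    intro l' st hst h
    match t, h with
    | [], h' => simp [pvCancelOnce] at h'
    | b :: rest, h =>
      by_cases hab : a = b
      · subst hab
        simp [pvCancelOnce] at h
        subst h
        simp [List.foldl, pvStep_step a hst]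
      · simp [pvCancelOnce, hab] at h
        obtain ⟨m, hm, rfl⟩ := h
        simpa [List.foldl] using ih m (pvStep st a) (pvStep_chain a hst) hm

-- a fixpoint of cancellation has no adjacent equal pair
theorem pvCancel_none_chain : ∀ {l : List Char}, pvCancelOnce l = none → l.IsChain (· ≠ ·) := by
  intro l
  induction l with
  | nil => intro _; exact List.isChain_nil
  | cons a t ih =>
    intro h
    match t with
    | [] => exact List.isChain_singleton a
    | b :: rest =>
      by_cases hab : a = b
      · simp [pvCancelOnce, hab] at h
      · simp [pvCancelOnce, hab] at h
        exact List.isChain_cons_cons.mpr ⟨hab, ih h⟩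

-- on a pair-free word the stack just accumulates all characters
theorem pvFoldl_chain_rev : ∀ (l st : List Char), (l.reverse ++ st).IsChain (· ≠ ·) →
    l.foldl pvStep st = l.reverse ++ st := by
  intro l
  induction l with
  | nil => intro st _; simp
  | cons c t ih =>
    intro st h
    have h' : (t.reverse ++ (c :: st)).IsChain (· ≠ ·) := by
      simpa [List.append_assoc] using h
    have hcs : pvStep st c = c :: st := by
      match st with
      | [] => simp [pvStep]
      | a :: u =>
        have hsuf : (c :: a :: u).IsChain (· ≠ ·) :=
          h'.suffix ⟨t.reverse, rfl⟩
        have hca : c ≠ a := (List.isChain_cons_cons.mp hsuf).1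
        simp [pvStep, Ne.symm hca]
    rw [List.foldl_cons, hcs, ih (c :: st) h']
    simp

theorem pvFix_none {l : List Char} (h : pvCancelOnce l = none) : pvFix l = l := by
  rw [pvFix]; split <;> simp_all

theorem pvFix_some {l l' : List Char} (h : pvCancelOnce l = some l') : pvFix l = pvFix l' := by
  rw [pvFix]; split <;> simp_all

theorem pvFix_spec : ∀ (n : ℕ) (l : List Char), l.length ≤ n →
    l.foldl pvStep [] = (pvFix l).foldl pvStep [] ∧ pvCancelOnce (pvFix l) = none := by
  intro n
  induction n with
  | zero =>
    intro l hl
    have hnil : l = [] := List.eq_nil_of_length_eq_zero (Nat.le_zero.mp hl)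
    subst hnil
    have h0 : pvCancelOnce ([] : List Char) = none := rfl
    rw [pvFix_none h0]
    exact ⟨rfl, h0⟩
  | succ n ih =>
    intro l hl
    rcases h : pvCancelOnce l with _ | l'
    · rw [pvFix_none h]; exact ⟨rfl, h⟩
    · have hlt := pvCancelOnce_length h
      have hle : l'.length ≤ n := by omega
      obtain ⟨h1, h2⟩ := ih l' hle
      rw [pvFix_some h]
      exact ⟨by rw [pvCancel_foldl l l' [] List.isChain_nil h, h1], h2⟩

theorem pvMain (l : List Char) : l.foldl pvStep [] = (pvFix l).reverse := by
  obtain ⟨h1, h2⟩ := pvFix_spec l.length l le_rfl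
  have hchain := pvCancel_none_chain h2
  have hrev : ((pvFix l).reverse ++ ([] : List Char)).IsChain (· ≠ ·) := by
    rw [List.append_nil, List.isChain_reverse]
    exact hchain.imp (fun _ _ h => Ne.symm h)
  rw [h1, pvFoldl_chain_rev _ [] hrev, List.append_nil]

-- ===== VERDICT (by name: the statement is the Claim_ definition above) =====
theorem solution_spec : Claim_equal_solution := by
  intro s _
  unfold Spec_solution solution solution_alt
  rw [pvMain]
  simp [List.reverse_eq_nil_iff]
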